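-- pv_equiv track=rewrite | github.com/mojomast/devussy | src/interview/repository_analyzer.py | _normalize_dependency_name
-- ===== SOURCE A (Python) =====
-- def _normalize_dependency_name(raw: str) -> str:
--     raw = raw.strip()
--     if not raw:
--         return ""
--     for separator in (";", "["):
--         if separator in raw:
--             raw = raw.split(separator, 1)[0]
--     for separator in ("<", ">", "=", "~", "!"):
--         if separator in raw:
--             raw = raw.split(separator, 1)[0]
--     if " " in raw:
--         raw = raw.split(" ", 1)[0]
--     return raw.strip()
-- ===== SOURCE B (Python) =====
-- SEPARATORS = ";[<>=~! "
--
-- def _normalize_dependency_name(raw: str) -> str: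
--     raw = raw.strip()
--     if not raw:
--         return ""
--     for i, ch in enumerate(raw):
--         if ch in SEPARATORS:
--             return raw[:i].strip()
--     return raw
-- ===== Notes on version B (the rewrite author's own statement) =====
-- stated objective: simpler
-- what changed: A runs three sequential split-phases (each 'sep in raw' scan plus a split) over the shrinking string; B makes one left-to-right scan of the stripped string and cuts at the first character belonging to the eight-separator set.
import Mathlib
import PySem

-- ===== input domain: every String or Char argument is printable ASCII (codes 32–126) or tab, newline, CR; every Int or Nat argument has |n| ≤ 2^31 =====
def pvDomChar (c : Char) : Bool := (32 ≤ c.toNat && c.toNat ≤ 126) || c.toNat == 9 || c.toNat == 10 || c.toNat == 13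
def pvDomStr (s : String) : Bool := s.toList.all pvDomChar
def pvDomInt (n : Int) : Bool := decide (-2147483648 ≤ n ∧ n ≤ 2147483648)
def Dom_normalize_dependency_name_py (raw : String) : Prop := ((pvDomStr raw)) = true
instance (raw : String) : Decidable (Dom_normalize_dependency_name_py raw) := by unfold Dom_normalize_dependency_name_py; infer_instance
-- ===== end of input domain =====

-- B replaces A's three sequential split-phases by one scan that cuts at the first separator character (objective: simpler).

-- ===== PORT A =====
-- the repeated Python loop body: if separator in raw: raw = raw.split(separator, 1)[0]
def pvCutA (r sep : String) : String :=
  if PySem.Str.isIn sep r then (((PySem.Str.splitMax? r sep 1).getD []).headD "") else r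

def normalize_dependency_name_py (raw : String) : String :=
  let r0 := PySem.Str.strip raw
  if r0 = "" then ""
  else
    let r1 := [(";" : String), "["].foldl pvCutA r0
    let r2 := [("<" : String), ">", "=", "~", "!"].foldl pvCutA r1
    let r3 := pvCutA r2 " "
    PySem.Str.strip r3

-- ===== PORT B =====
def pvSeps : List Char := [';', '[', '<', '>', '=', '~', '!', ' ']

-- the enumerate loop with early return: the prefix before the first separator, or none if no separator occurs
def pvScanB : List Char → Option (List Char)
  | [] => none
  | c :: cs => if c ∈ pvSeps then some [] else (pvScanB cs).map (c :: ·)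

def normalize_dependency_name_py_alt (raw : String) : String :=
  let r := PySem.Str.strip raw
  if r = "" then ""
  else
    match pvScanB r.toList with
    | some pre => PySem.Str.strip (String.ofList pre)
    | none => r

-- ===== PRECONDITION & SPEC =====
def Spec_normalize_dependency_name_py (raw : String) (out : String) : Prop := out = normalize_dependency_name_py_alt raw
instance (raw : String) (out : String) : Decidable (Spec_normalize_dependency_name_py raw out) := by unfold Spec_normalize_dependency_name_py; infer_instance

-- ===== CLAIM (what is proved, stated in full; the proofs are below) =====
def Claim_equal_normalize_dependency_name_py : Prop := ∀ (raw : String), Dom_normalize_dependency_name_py raw → Spec_normalize_dependency_name_py raw (normalize_dependency_name_py raw)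

-- ===== LEMMAS AND PROOFS =====

-- splitOnMax.go with maxsplit 0 returns the rest as a single piece
theorem pv_go_zero (c : Char) (n : Nat) (l : List Char) (acc : List (List Char)) :
    PySem.Chars.splitOnMax.go [c] n 0 l [] acc = (l :: acc).reverse := by
  rw [PySem.Chars.splitOnMax.go.eq_def]
  cases n <;> cases l <;> simp

-- head of splitOnMax.go with maxsplit 1 and a single-character separator is the part before the first occurrence
theorem pv_go_head (c : Char) : ∀ (fuel : Nat) (l cur : List Char) (acc : List (List Char)),
    l.length ≤ fuel →
    ∃ rest, PySem.Chars.splitOnMax.go [c] fuel 1 l cur acc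
      = acc.reverse ++ (cur.reverse ++ l.takeWhile (fun x => x ≠ c)) :: rest := by
  intro fuel
  induction fuel with
  | zero =>
    intro l cur acc hl
    have : l = [] := List.eq_nil_of_length_eq_zero (Nat.le_zero.mp hl)
    subst this
    exact ⟨[], by simp [PySem.Chars.splitOnMax.go]⟩
  | succ n ih =>
    intro l cur acc hl
    cases l with
    | nil => exact ⟨[], by simp [PySem.Chars.splitOnMax.go]⟩
    | cons h t =>
      rw [PySem.Chars.splitOnMax.go.eq_def]
      by_cases hc : h = c
      · subst hc
        refine ⟨[t], ?_⟩
        have hp : ([h] : List Char).isPrefixOf (h :: t) = true := by simp [List.isPrefixOf]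
        simp only [hp, if_pos, if_neg (one_ne_zero), List.length_cons, List.length_nil,
          List.drop_succ_cons, List.drop_zero, List.takeWhile_cons]
        rw [pv_go_zero]
        simp
      · have hp : ([c] : List Char).isPrefixOf (h :: t) = false := by
          simp [List.isPrefixOf]; exact fun h' => hc h'.symm
        obtain ⟨rest, hr⟩ := ih t (h :: cur) acc (by simpa using Nat.le_of_succ_le_succ hl)
        refine ⟨rest, ?_⟩
        simp only [hp, if_neg (one_ne_zero), Bool.false_eq_true, if_false]
        rw [hr]
        simp [hc]

-- A's cut for a one-character separator is takeWhile (≠ c)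
theorem pv_cut_toList (r : String) (c : Char) (sep : String) (hs : sep.toList = [c]) :
    (pvCutA r sep).toList = r.toList.takeWhile (fun x => x ≠ c) := by
  unfold pvCutA
  by_cases hin : PySem.Str.isIn sep r = true
  · rw [if_pos hin]
    have hne : sep.toList.isEmpty = false := by rw [hs]; rfl
    have hsplit : PySem.Str.splitMax? r sep 1
        = some (List.map String.ofList (PySem.Chars.splitOnMax r.toList [c] 1)) := by
      simp [PySem.Str.splitMax?, PySem.Chars.splitMax?, hs]
    obtain ⟨rest, hgo⟩ := pv_go_head c (r.toList.length + 1) r.toList [] [] (Nat.le_succ _)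
    rw [hsplit]
    simp only [Option.getD_some]
    unfold PySem.Chars.splitOnMax
    rw [if_neg (by decide : ¬ (1 : Int) < 0)]
    have h1 : (1 : Int).toNat = 1 := rfl
    rw [h1, hgo]
    simp
  · rw [if_neg hin]
    have hni : PySem.Chars.isIn [c] r.toList = false := by
      have := PySem.Str.isIn_eq sep r
      rw [hs] at this
      rw [← this]
      simpa using hin
    have hmem : c ∉ r.toList := by
      intro hm
      have : ([c] : List Char) <:+: r.toList := (List.singleton_infix_iff c r.toList).mpr hm
      exact (PySem.Chars.isIn_eq_false_iff _ _).mp hni this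
    rw [List.takeWhile_eq_self_iff.mpr]
    intro x hx
    simp only [ne_eq, decide_eq_true_eq]
    exact fun hxc => hmem (hxc ▸ hx)

-- B's scan characterised: the prefix before the first separator character, or none
theorem pv_scan_eq (l : List Char) :
    pvScanB l = if l.any (fun x => decide (x ∈ pvSeps)) then
        some (l.takeWhile (fun x => !decide (x ∈ pvSeps))) else none := by
  induction l with
  | nil => rfl
  | cons h t ih =>
    by_cases hm : h ∈ pvSeps
    · simp [pvScanB, hm]
    · simp only [pvScanB, if_neg hm, ih]
      by_cases ha : t.any (fun x => decide (x ∈ pvSeps))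
      · simp [ha, hm]
      · simp [ha, hm]

-- Chars.strip is idempotent
theorem pv_strip_strip (s : List Char) :
    PySem.Chars.strip (PySem.Chars.strip s) = PySem.Chars.strip s := by
  unfold PySem.Chars.strip PySem.Chars.rstrip PySem.Chars.lstrip
  set p := PySem.Chars.isspace
  set u := List.dropWhile p s with hu
  have hdu : List.dropWhile p u = u := List.dropWhile_idempotent p s
  set v := (List.dropWhile p u.reverse).reverse with hv
  have hpre : v <+: u := by
    obtain ⟨w, hw⟩ := List.dropWhile_suffix (l := u.reverse) p
    refine ⟨w.reverse, ?_⟩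
    rw [hv, ← List.reverse_append, hw, List.reverse_reverse]
  have hdv : List.dropWhile p v = v := by
    obtain ⟨w, hw⟩ := hpre
    cases hv' : v with
    | nil => simp
    | cons x xs =>
      have hx : p x = false := by
        have heq : List.dropWhile p (x :: (xs ++ w)) = x :: (xs ++ w) := by
          rw [← List.cons_append, ← hv', hw, hdu]
        by_contra hpx
        have hpx' : p x = true := by revert hpx; cases p x <;> simp
        rw [List.dropWhile_cons_of_pos hpx'] at heq
        have hlen := congrArg List.length heq
        have hle := List.length_dropWhile_le p (xs ++ w)
        simp [List.length_append] at hlen hle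
        omega
      rw [List.dropWhile_cons_of_neg (by simp [hx])]
  rw [hdv, hv, List.reverse_reverse, List.dropWhile_idempotent]

-- the eight single-character cuts compose to one takeWhile over the separator set
theorem pv_merge (t : List Char) :
    ((((((((t.takeWhile (fun x => x ≠ ';')).takeWhile (fun x => x ≠ '[')).takeWhile
      (fun x => x ≠ '<')).takeWhile (fun x => x ≠ '>')).takeWhile (fun x => x ≠ '=')).takeWhile
      (fun x => x ≠ '~')).takeWhile (fun x => x ≠ '!')).takeWhile (fun x => x ≠ ' '))
      = t.takeWhile (fun x => !decide (x ∈ pvSeps)) := by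
  simp only [List.takeWhile_takeWhile]
  congr 1
  funext x
  by_cases hx : x ∈ pvSeps
  · simp only [pvSeps, List.mem_cons, List.not_mem_nil, or_false] at hx
    rcases hx with h|h|h|h|h|h|h|h <;> subst h <;> decide
  · have h : ∀ c ∈ pvSeps, x ≠ c := fun c hc h => hx (h ▸ hc)
    simp only [pvSeps, List.mem_cons, List.not_mem_nil, or_false, forall_eq_or_imp, forall_eq] at h
    obtain ⟨h1,h2,h3,h4,h5,h6,h7,h8⟩ := h
    simp [hx, h1,h2,h3,h4,h5,h6,h7,h8]

-- A's value before the final strip, as a list of characters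
theorem pv_A_chain (r0 : String) :
    (pvCutA ([("<" : String), ">", "=", "~", "!"].foldl pvCutA
        ([(";" : String), "["].foldl pvCutA r0)) " ").toList
      = r0.toList.takeWhile (fun x => !decide (x ∈ pvSeps)) := by
  simp only [List.foldl_cons, List.foldl_nil]
  rw [pv_cut_toList _ ' ' " " rfl, pv_cut_toList _ '!' "!" rfl, pv_cut_toList _ '~' "~" rfl,
    pv_cut_toList _ '=' "=" rfl, pv_cut_toList _ '>' ">" rfl, pv_cut_toList _ '<' "<" rfl,
    pv_cut_toList _ '[' "[" rfl, pv_cut_toList _ ';' ";" rfl]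
  exact pv_merge _

-- ===== VERDICT (by name: the statement is the Claim_ definition above) =====
theorem normalize_dependency_name_py_spec : Claim_equal_normalize_dependency_name_py := by
  intro raw _
  unfold Spec_normalize_dependency_name_py normalize_dependency_name_py normalize_dependency_name_py_alt
  by_cases h0 : PySem.Str.strip raw = ""
  · simp [h0]
  · simp only [if_neg h0]
    rw [pv_scan_eq]
    by_cases hany : (PySem.Str.strip raw).toList.any (fun x => decide (x ∈ pvSeps))
    · simp only [hany, if_pos]
      apply String.toList_inj.mp
      show (PySem.Str.strip _).toList = (PySem.Str.strip _).toList
      simp only [PySem.Str.strip, String.toList_ofList]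
      rw [pv_A_chain]
      simp only [String.toList_ofList]
    · have hanyf : ((PySem.Str.strip raw).toList.any (fun x => decide (x ∈ pvSeps))) = false :=
        Bool.eq_false_iff.mpr hany
      simp only [hanyf, Bool.false_eq_true, if_false]
      have htw : (PySem.Chars.strip raw.toList).takeWhile (fun x => !decide (x ∈ pvSeps))
          = PySem.Chars.strip raw.toList := by
        rw [List.takeWhile_eq_self_iff]
        intro x hx
        have := List.any_eq_false.mp hanyf x (by simpa [PySem.Str.strip] using hx)
        simpa using this
      apply String.toList_inj.mp
      simp only [PySem.Str.strip, String.toList_ofList]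
      rw [pv_A_chain]
      simp only [String.toList_ofList]
      rw [htw]
      exact pv_strip_strip _
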